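-- pv_equiv track=rewrite | github.com/anshika27092003/casademo1 | streamlit_app.py | normalize_ck_payload
-- ===== SOURCE A (Python) =====
-- CK_STATIC_COLUMNS = [
--     "filename",
--     "supplier_name",
--     "consignment_number",
--     "invoice_date",
--     "invoice_no",
--     "bill_to",
--     "sub_total",
--     "gst_amount",
--     "total_amount",
--     "remarks",
-- ]
--
-- def normalize_ck_payload(filename, data):
--     """Keep CK data aligned to a strict, static CK table schema."""
--     payload = {
--         "filename": filename,
--         "supplier_name": "Not Found",
--         "consignment_number": "Not Found",
--         "invoice_date": "Not Found",
--         "invoice_no": "Not Found",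
--         "bill_to": "Not Found",
--         "sub_total": "Not Found",
--         "gst_amount": "0.00",
--         "total_amount": "Not Found",
--         "remarks": "Not Found",
--     }
--     for key in payload:
--         if key == "filename":
--             continue
--         value = data.get(key) if isinstance(data, dict) else None
--         if value not in (None, ""):
--             payload[key] = str(value)
--     return {k: payload[k] for k in CK_STATIC_COLUMNS}
-- ===== SOURCE B (Python) =====
-- CK_STATIC_COLUMNS = [
--     "filename",
--     "supplier_name",
--     "consignment_number",
--     "invoice_date",
--     "invoice_no",
--     "bill_to",
--     "sub_total",
--     "gst_amount",
--     "total_amount",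
--     "remarks",
-- ]
--
-- _CK_DEFAULTS = {
--     "supplier_name": "Not Found",
--     "consignment_number": "Not Found",
--     "invoice_date": "Not Found",
--     "invoice_no": "Not Found",
--     "bill_to": "Not Found",
--     "sub_total": "Not Found",
--     "gst_amount": "0.00",
--     "total_amount": "Not Found",
--     "remarks": "Not Found",
-- }
--
-- def normalize_ck_payload(filename, data):
--     """Keep CK data aligned to a strict, static CK table schema."""
--     overrides = (
--         {k: str(v) for k, v in data.items() if k in _CK_DEFAULTS and v not in (None, "")}
--         if isinstance(data, dict)
--         else {}
--     )
--     return {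
--         k: filename if k == "filename" else overrides.get(k, _CK_DEFAULTS[k])
--         for k in CK_STATIC_COLUMNS
--     }
-- ===== Notes on version B (the rewrite author's own statement) =====
-- stated objective: alternative
-- what changed: A mutates a prebuilt schema dict in place by looping over the fixed schema keys and querying data for each; B instead filters data's own items once into an overrides dict and builds the result by a get-with-default over the defaults, with the filename forced.
import Mathlib
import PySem

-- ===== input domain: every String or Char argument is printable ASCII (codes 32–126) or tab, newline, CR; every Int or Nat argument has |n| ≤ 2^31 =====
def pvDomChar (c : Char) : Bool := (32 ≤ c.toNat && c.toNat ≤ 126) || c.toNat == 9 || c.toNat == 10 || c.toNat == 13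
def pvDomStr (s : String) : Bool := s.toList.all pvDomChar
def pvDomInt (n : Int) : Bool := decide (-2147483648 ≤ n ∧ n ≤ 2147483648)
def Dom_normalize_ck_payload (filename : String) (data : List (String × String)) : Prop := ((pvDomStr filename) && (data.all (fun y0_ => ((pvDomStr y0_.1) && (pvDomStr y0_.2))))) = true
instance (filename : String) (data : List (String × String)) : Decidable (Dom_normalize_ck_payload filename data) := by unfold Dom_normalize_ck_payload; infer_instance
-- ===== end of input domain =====

-- B replaces A's mutate-the-schema-dict-in-place loop over the fixed keys by a filter of the
-- input's items into an overrides dict merged over the defaults (different decomposition; no speed claim).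

-- ===== PORT A =====
def ckStaticColumns : List String :=
  ["filename", "supplier_name", "consignment_number", "invoice_date", "invoice_no",
   "bill_to", "sub_total", "gst_amount", "total_amount", "remarks"]

-- one iteration of A's 'for key in payload' loop (data is always a dict here, so the
-- 'isinstance(data, dict)' test is True by typing; 'str(value)' on a str is the identity)
def ckStepA (d : PySem.Dict String String) (p : PySem.Dict String String) (key : String) :
    PySem.Dict String String :=
  if key == "filename" then p
  else
    match d.get? key with
    | none => p
    | some v => if v == "" then p else p.insert key v

def normalize_ck_payload (filename : String) (data : List (String × String)) : List (String × String) :=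
  let d : PySem.Dict String String := PySem.Dict.ofList data
  let payload0 : PySem.Dict String String := PySem.Dict.mk
    [("filename", filename), ("supplier_name", "Not Found"), ("consignment_number", "Not Found"),
     ("invoice_date", "Not Found"), ("invoice_no", "Not Found"), ("bill_to", "Not Found"),
     ("sub_total", "Not Found"), ("gst_amount", "0.00"), ("total_amount", "Not Found"),
     ("remarks", "Not Found")]
  let payload := payload0.keys.foldl (ckStepA d) payload0
  ckStaticColumns.map (fun k => (k, payload.getD k ""))

-- ===== PORT B =====
def ckDefaults : PySem.Dict String String := PySem.Dict.mk
  [("supplier_name", "Not Found"), ("consignment_number", "Not Found"),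
   ("invoice_date", "Not Found"), ("invoice_no", "Not Found"), ("bill_to", "Not Found"),
   ("sub_total", "Not Found"), ("gst_amount", "0.00"), ("total_amount", "Not Found"),
   ("remarks", "Not Found")]

def normalize_ck_payload_alt (filename : String) (data : List (String × String)) : List (String × String) :=
  let d : PySem.Dict String String := PySem.Dict.ofList data
  -- '{k: str(v) for k, v in data.items() if k in _CK_DEFAULTS and v not in (None, "")}'
  let overrides : PySem.Dict String String :=
    PySem.Dict.mk (d.items.filter (fun kv => ckDefaults.contains kv.1 && kv.2 != ""))
  ckStaticColumns.map (fun k =>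
    (k, if k == "filename" then filename else (overrides.get? k).getD (ckDefaults.getD k "")))

-- ===== PRECONDITION & SPEC =====
def Spec_normalize_ck_payload (filename : String) (data : List (String × String)) (out : List (String × String)) : Prop := out = normalize_ck_payload_alt filename data
instance (filename : String) (data : List (String × String)) (out : List (String × String)) : Decidable (Spec_normalize_ck_payload filename data out) := by unfold Spec_normalize_ck_payload; infer_instance

-- ===== CLAIM (what is proved, stated in full; the proofs are below) =====
def Claim_equal_normalize_ck_payload : Prop := ∀ (filename : String) (data : List (String × String)), Dom_normalize_ck_payload filename data → Spec_normalize_ck_payload filename data (normalize_ck_payload filename data)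

-- ===== LEMMAS AND PROOFS =====

-- one step of A's loop never changes the "filename" entry
theorem ckStepA_getD_filename (d p : PySem.Dict String String) (key : String) (c : String) :
    (ckStepA d p key).getD "filename" c = p.getD "filename" c := by
  unfold ckStepA
  by_cases h : key = "filename"
  · simp [h]
  · simp only [beq_iff_eq, if_neg h]
    cases d.get? key with
    | none => rfl
    | some v =>
      by_cases hv : v = ""
      · simp [hv]
      · simp [hv, PySem.Dict.getD_insert_of_ne p v c (fun he => h he.symm)]

-- one step at some other key never changes the entry at k
theorem ckStepA_getD_of_ne (d p : PySem.Dict String String) (key k : String) (c : String)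
    (hne : key ≠ k) : (ckStepA d p key).getD k c = p.getD k c := by
  unfold ckStepA
  by_cases h : key = "filename"
  · simp [h]
  · simp only [beq_iff_eq, if_neg h]
    cases d.get? key with
    | none => rfl
    | some v =>
      by_cases hv : v = ""
      · simp [hv]
      · simp [hv, PySem.Dict.getD_insert_of_ne p v c (fun he => hne he.symm)]

theorem foldA_getD_filename (d : PySem.Dict String String) (ks : List String)
    (p : PySem.Dict String String) (c : String) :
    (ks.foldl (ckStepA d) p).getD "filename" c = p.getD "filename" c := by
  induction ks generalizing p with
  | nil => rfl
  | cons key rest ih => rw [List.foldl_cons, ih, ckStepA_getD_filename]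

theorem foldA_getD_of_not_mem (d : PySem.Dict String String) (ks : List String)
    (p : PySem.Dict String String) (k c : String) (hk : k ∉ ks) :
    (ks.foldl (ckStepA d) p).getD k c = p.getD k c := by
  induction ks generalizing p with
  | nil => rfl
  | cons key rest ih =>
    rw [List.foldl_cons, ih _ (fun h => hk (List.mem_cons_of_mem _ h)),
      ckStepA_getD_of_ne _ _ _ _ _ (fun h => hk (by rw [← h]; exact List.mem_cons_self))]

-- the value A's loop leaves at a schema key k ≠ "filename"
theorem foldA_getD_of_mem (d : PySem.Dict String String) (ks : List String)
    (p : PySem.Dict String String) (k c : String) (hk : k ∈ ks) (hnd : ks.Nodup)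
    (hf : k ≠ "filename") :
    (ks.foldl (ckStepA d) p).getD k c =
      (match d.get? k with
       | none => p.getD k c
       | some v => if v == "" then p.getD k c else v) := by
  induction ks generalizing p with
  | nil => cases hk
  | cons key rest ih =>
    rw [List.foldl_cons]
    rcases List.mem_cons.mp hk with rfl | hmem
    · have hrest : k ∉ rest := (List.nodup_cons.mp hnd).1
      rw [foldA_getD_of_not_mem _ _ _ _ _ hrest]
      unfold ckStepA
      simp only [beq_iff_eq, if_neg hf]
      cases d.get? k with
      | none => rfl
      | some v =>
        by_cases hv : v = ""
        · simp [hv]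
        · simp [hv, PySem.Dict.getD_insert_self]
    · have hne : key ≠ k := fun h => (List.nodup_cons.mp hnd).1 (h ▸ hmem)
      rw [ih _ hmem (List.nodup_cons.mp hnd).2, ckStepA_getD_of_ne _ _ _ _ _ hne]

-- Dict.get? is first-match search over the items list (definitional)
theorem dictGet?_eq_find? (d : PySem.Dict String String) (k : String) :
    d.get? k = (d.items.find? (fun p => p.1 == k)).map Prod.snd := rfl

-- lookup in the filtered items of a nodup-keyed list
theorem get?_mk_filter (l : List (String × String)) (q : String × String → Bool) (k : String)
    (hnd : (l.map Prod.fst).Nodup) :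
    (PySem.Dict.mk (l.filter q)).get? k =
      (match l.find? (fun p => p.1 == k) with
       | some p => if q p then some p.2 else none
       | none => none) := by
  induction l with
  | nil => rfl
  | cons p rest ih =>
    obtain ⟨a, b⟩ := p
    have hnd' : (rest.map Prod.fst).Nodup := (List.nodup_cons.mp hnd).2
    by_cases hk : a = k
    · have hrest : ∀ r ∈ rest, ¬ (r.1 == k) = true := by
        intro r hr hb
        have h1 : r.1 ∈ rest.map Prod.fst := List.mem_map_of_mem hr
        rw [beq_iff_eq.mp hb] at h1
        exact (List.nodup_cons.mp hnd).1 (by rw [hk]; exact h1)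
      have hnone : rest.find? (fun r => r.1 == k) = none := List.find?_eq_none.mpr hrest
      have hmknone : (PySem.Dict.mk (rest.filter q)).get? k = none := by
        rw [ih hnd', hnone]
      rw [List.find?_cons_of_pos (by simpa using hk)]
      by_cases hq : q (a, b) = true
      · simp only [List.filter_cons, hq, if_true]
        rw [PySem.Dict.get?_mk_cons]
        simp [hk]
      · simp only [List.filter_cons, hq, Bool.false_eq_true, if_false]
        rw [hmknone]
    · have hb : ¬ ((a, b).1 == k) = true := by simp [hk]
      rw [List.find?_cons_of_neg (by simpa using hk)]
      by_cases hq : q (a, b) = true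
      · simp only [List.filter_cons, hq, if_true]
        rw [PySem.Dict.get?_mk_cons]
        simp only [show (a == k) = false by simpa using hk, Bool.false_eq_true, if_false]
        exact ih hnd'
      · simp only [List.filter_cons, hq, Bool.false_eq_true, if_false]
        exact ih hnd'

-- component-wise agreement at a non-filename schema key
theorem ck_component_eq (filename : String) (data : List (String × String)) (k : String)
    (hk : k ∈ ckStaticColumns) (hf : k ≠ "filename")
    (hdef : ckDefaults.contains k = true)
    (hd0 : (PySem.Dict.mk
      [("filename", filename), ("supplier_name", "Not Found"), ("consignment_number", "Not Found"),
       ("invoice_date", "Not Found"), ("invoice_no", "Not Found"), ("bill_to", "Not Found"),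
       ("sub_total", "Not Found"), ("gst_amount", "0.00"), ("total_amount", "Not Found"),
       ("remarks", "Not Found")]).getD k "" = ckDefaults.getD k "") :
    ((PySem.Dict.mk
      [("filename", filename), ("supplier_name", "Not Found"), ("consignment_number", "Not Found"),
       ("invoice_date", "Not Found"), ("invoice_no", "Not Found"), ("bill_to", "Not Found"),
       ("sub_total", "Not Found"), ("gst_amount", "0.00"), ("total_amount", "Not Found"),
       ("remarks", "Not Found")]).keys.foldl (ckStepA (PySem.Dict.ofList data))
        (PySem.Dict.mk
      [("filename", filename), ("supplier_name", "Not Found"), ("consignment_number", "Not Found"),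
       ("invoice_date", "Not Found"), ("invoice_no", "Not Found"), ("bill_to", "Not Found"),
       ("sub_total", "Not Found"), ("gst_amount", "0.00"), ("total_amount", "Not Found"),
       ("remarks", "Not Found")])).getD k "" =
    ((PySem.Dict.mk ((PySem.Dict.ofList data).items.filter
        (fun kv => ckDefaults.contains kv.1 && kv.2 != ""))).get? k).getD
      (ckDefaults.getD k "") := by
  have hkeys : (PySem.Dict.mk
      [("filename", filename), ("supplier_name", "Not Found"), ("consignment_number", "Not Found"),
       ("invoice_date", "Not Found"), ("invoice_no", "Not Found"), ("bill_to", "Not Found"),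
       ("sub_total", "Not Found"), ("gst_amount", "0.00"), ("total_amount", "Not Found"),
       ("remarks", "Not Found")]).keys = ckStaticColumns := rfl
  have hndcols : ckStaticColumns.Nodup := by decide
  rw [hkeys, foldA_getD_of_mem _ _ _ _ _ hk hndcols hf, hd0]
  have hnd : ((PySem.Dict.ofList data).items.map Prod.fst).Nodup :=
    PySem.Dict.nodup_keys_ofList data
  rw [get?_mk_filter _ _ _ hnd]
  rw [dictGet?_eq_find? (PySem.Dict.ofList data) k]
  cases hfind : (PySem.Dict.ofList data).items.find? (fun p => p.1 == k) with
  | none => simp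
  | some p =>
    have hpk : p.1 = k := by
      have h2 := List.find?_some hfind
      simpa using h2
    by_cases hv : p.2 = ""
    · simp [hpk, hv, hdef]
    · simp [hpk, hv, hdef]

-- ===== VERDICT (by name: the statement is the Claim_ definition above) =====
theorem normalize_ck_payload_spec : Claim_equal_normalize_ck_payload := by
  intro filename data _
  show normalize_ck_payload filename data = normalize_ck_payload_alt filename data
  unfold normalize_ck_payload normalize_ck_payload_alt
  simp only [ckStaticColumns, List.map, Prod.mk.injEq, List.cons.injEq, and_true, true_and]
  refine ⟨?_, ?_, ?_, ?_, ?_, ?_, ?_, ?_, ?_, ?_⟩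
  · rw [foldA_getD_filename]
    simp [PySem.Dict.getD_eq_get?_getD, PySem.Dict.get?_mk_cons]
  all_goals
    exact ck_component_eq filename data _ (by decide) (by decide) (by decide)
      (by simp [ckDefaults, PySem.Dict.getD_eq_get?_getD, PySem.Dict.get?_mk_cons])
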